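-- pv_equiv track=rewrite | github.com/RK-41/GeeksForGeeks | Difficulty: Medium/Shop in Candy Store/shop-in-candy-store.py | minMaxCandy
-- ===== SOURCE A (Python) =====
-- def minMaxCandy(prices, k):
--     minVal = 0
--     prices.sort()
--     low = 0
--     high = len(prices)-1
--     while low<=high:
--         minVal+=prices[low]
--         high-=k
--         low+=1
--     low =0
--     high = len(prices)-1
--     maxVal = 0
--     while low<=high:
--         maxVal+=prices[high]
--         low+=k
--         high-=1
--     return [minVal,maxVal]
-- ===== SOURCE B (Python) =====
-- def minMaxCandy(prices, k):
--     prices.sort()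
--     n = len(prices)
--     c = (n + k) // (k + 1)
--     minVal = sum(prices[:c])
--     maxVal = sum(prices[n - c:])
--     return [minVal, maxVal]
-- ===== Notes on version B (the rewrite author's own statement) =====
-- stated objective: simpler
-- what changed: Replaces A's two index-stepping while loops with a closed-form count of paid items c = ceil(n/(k+1)) and two slice sums over the sorted list.
-- outside the precondition, e.g. on minMaxCandy([], -1): A returns [0, 0], B raises ZeroDivisionError
import Mathlib
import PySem

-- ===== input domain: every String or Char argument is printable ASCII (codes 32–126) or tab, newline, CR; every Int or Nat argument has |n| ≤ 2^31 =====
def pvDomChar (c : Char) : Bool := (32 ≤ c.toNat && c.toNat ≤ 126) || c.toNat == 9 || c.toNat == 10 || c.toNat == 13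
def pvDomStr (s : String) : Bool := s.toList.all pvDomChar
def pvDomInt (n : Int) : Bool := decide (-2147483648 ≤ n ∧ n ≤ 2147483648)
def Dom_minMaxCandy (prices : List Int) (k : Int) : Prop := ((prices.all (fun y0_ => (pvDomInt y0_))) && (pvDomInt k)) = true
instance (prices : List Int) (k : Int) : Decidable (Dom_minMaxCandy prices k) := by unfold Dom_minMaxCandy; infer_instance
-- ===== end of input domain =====

-- B replaces A's two index-stepping while loops by the closed-form paid-item count
-- c = ceil(n/(k+1)) and two slice sums; like A it sorts the argument in place (return
-- value equivalence is what is proved). Equivalence is claimed for 0 ≤ k (see Pre_).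

-- ===== PORT A =====
-- A's first while loop: minVal += prices[low]; high -= k; low += 1.
-- k is passed as the Nat k.toNat, which equals k under Pre_ (0 ≤ k); for k < 0 and a
-- nonempty list the Python loop never terminates, and those inputs are outside Pre_.
-- The index low is always in range when the loop body runs, so pyGetD is exact here.
def pvLoopMin (l : List Int) (kN : Nat) (low high acc : Int) : Int :=
  if low ≤ high then
    pvLoopMin l kN (low + 1) (high - kN) (acc + PySem.List.pyGetD l low 0)
  else acc
termination_by (high + 1 - low).toNat
decreasing_by omega

-- A's second while loop: maxVal += prices[high]; low += k; high -= 1.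
def pvLoopMax (l : List Int) (kN : Nat) (low high acc : Int) : Int :=
  if low ≤ high then
    pvLoopMax l kN (low + kN) (high - 1) (acc + PySem.List.pyGetD l high 0)
  else acc
termination_by (high + 1 - low).toNat
decreasing_by omega

def minMaxCandy (prices : List Int) (k : Int) : List Int :=
  let s := PySem.List.sorted prices (fun x => x) false
  let minVal := pvLoopMin s k.toNat 0 ((s.length : Int) - 1) 0
  let maxVal := pvLoopMax s k.toNat 0 ((s.length : Int) - 1) 0
  [minVal, maxVal]

-- ===== PORT B =====
def minMaxCandy_alt (prices : List Int) (k : Int) : List Int :=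
  let s := PySem.List.sorted prices (fun x => x) false
  let n : Int := s.length
  let c := PySem.Int.floordiv (n + k) (k + 1)
  let minVal := (PySem.List.slice s none (some c)).sum
  let maxVal := (PySem.List.slice s (some (n - c)) none).sum
  [minVal, maxVal]

-- ===== PRECONDITION & SPEC =====
-- Pre_ excludes negative k: there A's loops move the bound the wrong way and diverge on
-- every nonempty list, returning [0,0] only on the empty list by accident, while B's
-- division by k+1 raises ZeroDivisionError at k = -1.
def Pre_minMaxCandy (prices : List Int) (k : Int) : Prop := 0 ≤ k
instance (prices : List Int) (k : Int) : Decidable (Pre_minMaxCandy prices k) := by unfold Pre_minMaxCandy; infer_instance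
def pvWitness_minMaxCandy : List Int × Int := ([3, 1, 2], 1)

def Spec_minMaxCandy (prices : List Int) (k : Int) (out : List Int) : Prop := out = minMaxCandy_alt prices k
instance (prices : List Int) (k : Int) (out : List Int) : Decidable (Spec_minMaxCandy prices k out) := by unfold Spec_minMaxCandy; infer_instance

-- ===== CLAIM (what is proved, stated in full; the proofs are below) =====
def Claim_equal_minMaxCandy : Prop := ∀ (prices : List Int) (k : Int), Dom_minMaxCandy prices k → Pre_minMaxCandy prices k → Spec_minMaxCandy prices k (minMaxCandy prices k)

-- ===== LEMMAS AND PROOFS =====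

-- Number of iterations of either loop, as a function of the initial bounds.
def pvCnt (low high : Int) (kN : Nat) : Nat :=
  if low ≤ high then (high - low).toNat / (kN + 1) + 1 else 0

theorem pvCnt_recMin (low high : Int) (kN : Nat) (h : low ≤ high) :
    pvCnt low high kN = pvCnt (low + 1) (high - kN) kN + 1 := by
  unfold pvCnt
  by_cases h2 : low + 1 ≤ high - kN
  · have hg : (high - low).toNat = (high - kN - (low + 1)).toNat + (kN + 1) := by omega
    rw [if_pos h, if_pos h2, hg, Nat.add_div_right _ (Nat.succ_pos kN)]
  · have hg : (high - low).toNat < kN + 1 := by omega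
    rw [if_pos h, if_neg h2, Nat.div_eq_of_lt hg]

theorem pvCnt_recMax (low high : Int) (kN : Nat) (h : low ≤ high) :
    pvCnt low high kN = pvCnt (low + kN) (high - 1) kN + 1 := by
  unfold pvCnt
  by_cases h2 : low + kN ≤ high - 1
  · have hg : (high - low).toNat = (high - 1 - (low + kN)).toNat + (kN + 1) := by omega
    rw [if_pos h, if_pos h2, hg, Nat.add_div_right _ (Nat.succ_pos kN)]
  · have hg : (high - low).toNat < kN + 1 := by omega
    rw [if_pos h, if_neg h2, Nat.div_eq_of_lt hg]

theorem pvLoopMin_eq (l : List Int) (kN : Nat) :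
    ∀ (c : Nat) (low high acc : Int), pvCnt low high kN = c →
      pvLoopMin l kN low high acc
        = acc + ((List.range c).map (fun i : Nat => PySem.List.pyGetD l (low + (i : Int)) 0)).sum := by
  intro c
  induction c with
  | zero =>
    intro low high acc hc
    have h : ¬ low ≤ high := by
      intro h; rw [pvCnt, if_pos h] at hc; exact absurd hc (Nat.succ_ne_zero _)
    rw [pvLoopMin, if_neg h]
    simp
  | succ c ih =>
    intro low high acc hc
    have h : low ≤ high := by
      by_contra h; rw [pvCnt, if_neg h] at hc; omega
    have hc' : pvCnt (low + 1) (high - kN) kN = c := by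
      have := pvCnt_recMin low high kN h; omega
    rw [pvLoopMin, if_pos h, ih (low + 1) (high - kN) _ hc']
    rw [List.range_succ_eq_map]
    simp only [List.map_cons, List.map_map, List.sum_cons]
    have he : ((List.range c).map ((fun i : Nat => PySem.List.pyGetD l (low + (i : Int)) 0) ∘ (· + 1)))
        = (List.range c).map (fun i : Nat => PySem.List.pyGetD l (low + 1 + (i : Int)) 0) := by
      apply List.map_congr_left; intro i _
      simp only [Function.comp]
      congr 1; push_cast; ring
    rw [he]; push_cast; ring_nf

theorem pvLoopMax_eq (l : List Int) (kN : Nat) :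
    ∀ (c : Nat) (low high acc : Int), pvCnt low high kN = c →
      pvLoopMax l kN low high acc
        = acc + ((List.range c).map (fun i : Nat => PySem.List.pyGetD l (high - (i : Int)) 0)).sum := by
  intro c
  induction c with
  | zero =>
    intro low high acc hc
    have h : ¬ low ≤ high := by
      intro h; rw [pvCnt, if_pos h] at hc; exact absurd hc (Nat.succ_ne_zero _)
    rw [pvLoopMax, if_neg h]
    simp
  | succ c ih =>
    intro low high acc hc
    have h : low ≤ high := by
      by_contra h; rw [pvCnt, if_neg h] at hc; omega
    have hc' : pvCnt (low + kN) (high - 1) kN = c := by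
      have := pvCnt_recMax low high kN h; omega
    rw [pvLoopMax, if_pos h, ih (low + kN) (high - 1) _ hc']
    rw [List.range_succ_eq_map]
    simp only [List.map_cons, List.map_map, List.sum_cons]
    have he : ((List.range c).map ((fun i : Nat => PySem.List.pyGetD l (high - (i : Int)) 0) ∘ (· + 1)))
        = (List.range c).map (fun i : Nat => PySem.List.pyGetD l (high - 1 - (i : Int)) 0) := by
      apply List.map_congr_left; intro i _
      simp only [Function.comp]
      congr 1; push_cast; ring
    rw [he]; push_cast; ring_nf

theorem sum_range_getD_take (l : List Int) (c : Nat) (hc : c ≤ l.length) :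
    ((List.range c).map (fun i : Nat => PySem.List.pyGetD l ((0 : Int) + (i : Int)) 0)).sum
      = (l.take c).sum := by
  induction c with
  | zero => simp
  | succ c ih =>
    have hci : c < l.length := by omega
    rw [List.range_succ, List.map_append, List.sum_append, ih (by omega)]
    have ht : l.take (c + 1) = l.take c ++ [l[c]] := by
      rw [List.take_add_one]; simp [List.getElem?_eq_getElem hci]
    rw [ht, List.sum_append]
    simp [List.getElem?_eq_getElem hci]

theorem sum_range_getD_drop (l : List Int) (c : Nat) (hc : c ≤ l.length) :
    ((List.range c).map (fun i : Nat => PySem.List.pyGetD l ((l.length : Int) - 1 - (i : Int)) 0)).sum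
      = (l.drop (l.length - c)).sum := by
  induction c with
  | zero => simp
  | succ c ih =>
    have hci : l.length - (c + 1) < l.length := by omega
    rw [List.range_succ, List.map_append, List.sum_append, ih (by omega)]
    have he : l.length - (c + 1) + 1 = l.length - c := by omega
    have hd : l.drop (l.length - (c + 1)) = l[l.length - (c + 1)] :: l.drop (l.length - c) := by
      rw [List.drop_eq_getElem_cons hci, he]
    rw [hd, List.sum_cons]
    have h0 : (l.length : Int) - 1 - (c : Int) = ((l.length - (c + 1) : Nat) : Int) := by omega
    simp only [List.map_cons, List.map_nil, List.sum_cons, List.sum_nil, add_zero]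
    rw [h0]
    simp [List.getElem?_eq_getElem hci]
    ring

-- the paid-item count: A's iteration count equals B's ceil division
theorem cnt_eq_ceil (n kN : Nat) :
    pvCnt 0 ((n : Int) - 1) kN = (n + kN) / (kN + 1) := by
  unfold pvCnt
  rcases Nat.eq_zero_or_pos n with h | h
  · subst h
    rw [if_neg (by omega), Nat.div_eq_of_lt (by omega)]
  · rw [if_pos (by omega)]
    have hg : ((n : Int) - 1 - 0).toNat = n - 1 := by omega
    have hn : n + kN = (n - 1) + (kN + 1) := by omega
    rw [hg, hn, Nat.add_div_right _ (Nat.succ_pos kN)]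

theorem ceil_le (n kN : Nat) : (n + kN) / (kN + 1) ≤ n := by
  have h : n + kN ≤ kN + (kN + 1) * n := by
    have : n ≤ n * (kN + 1) := Nat.le_mul_of_pos_right n (Nat.succ_pos kN)
    nlinarith
  calc (n + kN) / (kN + 1) ≤ (kN + (kN + 1) * n) / (kN + 1) := Nat.div_le_div_right h
    _ = n := by rw [Nat.add_mul_div_left _ _ (Nat.succ_pos kN), Nat.div_eq_of_lt (by omega)]; omega

-- ===== VERDICT (by name: the statement is the Claim_ definition above) =====
theorem minMaxCandy_spec : Claim_equal_minMaxCandy := by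
  intro prices k _ hk
  have hk0 : (0 : Int) ≤ k := hk
  show minMaxCandy prices k = minMaxCandy_alt prices k
  simp only [minMaxCandy, minMaxCandy_alt]
  set s := PySem.List.sorted prices (fun x => x) false with hs
  set n : Nat := s.length with hn
  set kN : Nat := k.toNat with hkN
  have hkk : k = (kN : Int) := by omega
  set cN : Nat := (n + kN) / (kN + 1) with hcN
  have hcle : cN ≤ n := ceil_le n kN
  have hcnt : pvCnt 0 ((n : Int) - 1) kN = cN := cnt_eq_ceil n kN
  have hc : PySem.Int.floordiv ((n : Int) + k) (k + 1) = (cN : Int) := by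
    rw [hkk]
    have h1 : (n : Int) + (kN : Int) = ((n + kN : Nat) : Int) := by push_cast; ring
    have h2 : (kN : Int) + 1 = ((kN + 1 : Nat) : Int) := by push_cast; ring
    rw [h1, h2, PySem.Int.floordiv_natCast]
  rw [hc]
  have hmin : pvLoopMin s kN 0 ((n : Int) - 1) 0
      = (PySem.List.slice s none (some (cN : Int))).sum := by
    rw [pvLoopMin_eq s kN cN 0 ((n : Int) - 1) 0 hcnt]
    rw [PySem.List.slice_to_natCast]
    rw [sum_range_getD_take s cN hcle]
    ring
  have hmax : pvLoopMax s kN 0 ((n : Int) - 1) 0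
      = (PySem.List.slice s (some ((n : Int) - (cN : Int))) none).sum := by
    rw [pvLoopMax_eq s kN cN 0 ((n : Int) - 1) 0 hcnt]
    have hnc : (n : Int) - (cN : Int) = ((n - cN : Nat) : Int) := by omega
    rw [hnc, PySem.List.slice_from_natCast]
    rw [sum_range_getD_drop s cN hcle]
    ring
  rw [hmin, hmax]
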